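-- pv_equiv track=rewrite | github.com/bertis-informatics/msmu | msmu/_preprocessing/_map_representatives.py | _select_canon_prot
-- ===== SOURCE A (Python) =====
-- def _select_canon_prot(protein_list: list[str]) -> str:
--     """
--     Select canonical protein from protein list based on priority.
--     canonical > swissprot > trembl > contam
--
--     Args:
--         protein_list (list[str]): list of proteins (uniprot entry)
--
--     Returns:
--         protein_group (str): canonical protein group
--     """
--     swissprot_canon_ls = [prot for prot in protein_list if prot.startswith("sp") and "-" not in prot]
--     if swissprot_canon_ls:
--         return ",".join(swissprot_canon_ls)
--
--     swissprot_ls = [prot for prot in protein_list if prot.startswith("sp")]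
--     if swissprot_ls:
--         return ",".join(swissprot_ls)
--
--     trembl_ls = [prot for prot in protein_list if prot.startswith("tr")]
--     if trembl_ls:
--         return ",".join(trembl_ls)
--
--     contam_ls = [prot for prot in protein_list if prot.startswith("contam")]
--     if contam_ls:
--         return ",".join(contam_ls)
--
--     return ""
-- ===== SOURCE B (Python) =====
-- def _select_canon_prot(protein_list: list[str]) -> str:
--     """Single pass: sort each protein into priority buckets, then join the
--     first non-empty bucket (canonical > swissprot > trembl > contam)."""
--     canon, sp, tr, contam = [], [], [], []
--     for prot in protein_list:
--         if prot.startswith("sp"):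
--             sp.append(prot)
--             if "-" not in prot:
--                 canon.append(prot)
--         elif prot.startswith("tr"):
--             tr.append(prot)
--         elif prot.startswith("contam"):
--             contam.append(prot)
--     for bucket in (canon, sp, tr, contam):
--         if bucket:
--             return ",".join(bucket)
--     return ""
-- ===== Notes on version B (the rewrite author's own statement) =====
-- stated objective: simpler
-- what changed: Replaces four separate filtered scans of protein_list with one pass that drops each protein into its priority bucket, then joins the first non-empty bucket.
import Mathlib
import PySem

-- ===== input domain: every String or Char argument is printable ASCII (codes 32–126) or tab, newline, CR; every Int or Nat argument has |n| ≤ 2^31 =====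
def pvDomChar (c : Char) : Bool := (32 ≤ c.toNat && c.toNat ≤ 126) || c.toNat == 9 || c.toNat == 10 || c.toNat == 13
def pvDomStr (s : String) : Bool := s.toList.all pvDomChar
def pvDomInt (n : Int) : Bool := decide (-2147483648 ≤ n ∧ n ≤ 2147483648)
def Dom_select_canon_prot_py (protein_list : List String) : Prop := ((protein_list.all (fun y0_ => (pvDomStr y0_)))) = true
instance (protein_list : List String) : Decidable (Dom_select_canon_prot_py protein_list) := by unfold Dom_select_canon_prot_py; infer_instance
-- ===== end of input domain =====

-- B replaces A's four repeated filtered scans with one pass that builds the priority buckets; objective: simpler.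

-- ===== PORT A =====
def select_canon_prot_py (protein_list : List String) : String :=
  let swissprot_canon_ls := protein_list.filter (fun prot => PySem.Str.startswith prot "sp" && !(PySem.Str.isIn "-" prot))
  if swissprot_canon_ls ≠ [] then PySem.Str.join "," swissprot_canon_ls
  else
    let swissprot_ls := protein_list.filter (fun prot => PySem.Str.startswith prot "sp")
    if swissprot_ls ≠ [] then PySem.Str.join "," swissprot_ls
    else
      let trembl_ls := protein_list.filter (fun prot => PySem.Str.startswith prot "tr")
      if trembl_ls ≠ [] then PySem.Str.join "," trembl_ls
      else
        let contam_ls := protein_list.filter (fun prot => PySem.Str.startswith prot "contam")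
        if contam_ls ≠ [] then PySem.Str.join "," contam_ls
        else ""

-- ===== PORT B =====
-- loop body of B's single pass: route one protein into the bucket state (canon, sp, tr, contam)
def pvStep (st : List String × List String × List String × List String) (prot : String) :
    List String × List String × List String × List String :=
  let (canon, sp, tr, contam) := st
  if PySem.Str.startswith prot "sp" then
    if PySem.Str.isIn "-" prot then (canon, sp ++ [prot], tr, contam)
    else (canon ++ [prot], sp ++ [prot], tr, contam)
  else if PySem.Str.startswith prot "tr" then (canon, sp, tr ++ [prot], contam)
  else if PySem.Str.startswith prot "contam" then (canon, sp, tr, contam ++ [prot])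
  else (canon, sp, tr, contam)

def select_canon_prot_py_alt (protein_list : List String) : String :=
  let st := protein_list.foldl pvStep ([], [], [], [])
  let (canon, sp, tr, contam) := st
  if canon ≠ [] then PySem.Str.join "," canon
  else if sp ≠ [] then PySem.Str.join "," sp
  else if tr ≠ [] then PySem.Str.join "," tr
  else if contam ≠ [] then PySem.Str.join "," contam
  else ""

-- ===== PRECONDITION & SPEC =====
def Spec_select_canon_prot_py (protein_list : List String) (out : String) : Prop := out = select_canon_prot_py_alt protein_list
instance (protein_list : List String) (out : String) : Decidable (Spec_select_canon_prot_py protein_list out) := by unfold Spec_select_canon_prot_py; infer_instance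

-- ===== CLAIM (what is proved, stated in full; the proofs are below) =====
def Claim_equal_select_canon_prot_py : Prop := ∀ (protein_list : List String), Dom_select_canon_prot_py protein_list → Spec_select_canon_prot_py protein_list (select_canon_prot_py protein_list)

-- ===== LEMMAS AND PROOFS =====

-- mutual exclusivity of the prefixes "sp", "tr", "contam" (distinct first characters)
lemma pv_sp_not_tr (l : List Char) (h : PySem.Chars.startswith l ['s', 'p'] = true) :
    PySem.Chars.startswith l ['t', 'r'] = false := by
  cases h2 : PySem.Chars.startswith l ['t', 'r'] with
  | false => rfl
  | true =>
    exfalso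
    rw [PySem.Chars.startswith_iff] at h h2
    obtain ⟨t1, ht1⟩ := h
    obtain ⟨t2, ht2⟩ := h2
    rw [← ht1] at ht2
    simp at ht2

lemma pv_sp_not_contam (l : List Char) (h : PySem.Chars.startswith l ['s', 'p'] = true) :
    PySem.Chars.startswith l ['c', 'o', 'n', 't', 'a', 'm'] = false := by
  cases h2 : PySem.Chars.startswith l ['c', 'o', 'n', 't', 'a', 'm'] with
  | false => rfl
  | true =>
    exfalso
    rw [PySem.Chars.startswith_iff] at h h2
    obtain ⟨t1, ht1⟩ := h
    obtain ⟨t2, ht2⟩ := h2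
    rw [← ht1] at ht2
    simp at ht2

lemma pv_tr_not_contam (l : List Char) (h : PySem.Chars.startswith l ['t', 'r'] = true) :
    PySem.Chars.startswith l ['c', 'o', 'n', 't', 'a', 'm'] = false := by
  cases h2 : PySem.Chars.startswith l ['c', 'o', 'n', 't', 'a', 'm'] with
  | false => rfl
  | true =>
    exfalso
    rw [PySem.Chars.startswith_iff] at h h2
    obtain ⟨t1, ht1⟩ := h
    obtain ⟨t2, ht2⟩ := h2
    rw [← ht1] at ht2
    simp at ht2

-- the fold computes the four filters, appended to the incoming state
lemma pv_fold_inv (pl : List String) :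
    ∀ c s t m, pl.foldl pvStep (c, s, t, m) =
      (c ++ pl.filter (fun p => PySem.Str.startswith p "sp" && !(PySem.Str.isIn "-" p)),
       s ++ pl.filter (fun p => PySem.Str.startswith p "sp"),
       t ++ pl.filter (fun p => PySem.Str.startswith p "tr"),
       m ++ pl.filter (fun p => PySem.Str.startswith p "contam")) := by
  induction pl with
  | nil => intro c s t m; simp
  | cons hd tl ih =>
    intro c s t m
    simp only [List.foldl_cons, pvStep]
    by_cases hsp : PySem.Chars.startswith hd.toList ['s', 'p'] = true
    · have htr := pv_sp_not_tr hd.toList hsp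
      have hct := pv_sp_not_contam hd.toList hsp
      by_cases hdash : PySem.Chars.isIn ['-'] hd.toList = true
      · simp [hsp, hdash, htr, hct, ih]
      · simp [hsp, hdash, htr, hct, ih]
    · by_cases htr : PySem.Chars.startswith hd.toList ['t', 'r'] = true
      · have hct := pv_tr_not_contam hd.toList htr
        simp [hsp, htr, hct, ih]
      · by_cases hct : PySem.Chars.startswith hd.toList ['c', 'o', 'n', 't', 'a', 'm'] = true
        · simp [hsp, htr, hct, ih]
        · simp [hsp, htr, hct, ih]

-- ===== VERDICT (by name: the statement is the Claim_ definition above) =====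
theorem select_canon_prot_py_spec : Claim_equal_select_canon_prot_py := by
  intro pl _
  unfold Spec_select_canon_prot_py select_canon_prot_py select_canon_prot_py_alt
  rw [pv_fold_inv pl [] [] [] []]
  simp only [List.nil_append]
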